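-- pv_equiv track=rewrite | github.com/kopsha/coding-interview | pin-variations/pythonic.py | pin_variations
-- ===== SOURCE A (Python) =====
-- from itertools import combinations, product
--
-- def neighbours(row, col):
--     keyboard = [
--         [None, None, None, None, None],
--         [None,  '1',  '2',  '3', None],
--         [None,  '4',  '5',  '6', None],
--         [None,  '7',  '8',  '9', None],
--         [None,  '*',  '0',  '#', None],
--         [None, None, None, None, None],
--     ]
--
--     result = {
--         keyboard[row + y][col + x]
--         for y, x in [(-1, 0), (0, -1), (0, 0), (0, 1), (1, 0)]
--     }
--
--     return result ^ {None}
--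
-- def pin_variations(pin):
--     focus_map = {
--         '1': neighbours(1, 1),
--         '2': neighbours(1, 2),
--         '3': neighbours(1, 3),
--         '4': neighbours(2, 1),
--         '5': neighbours(2, 2),
--         '6': neighbours(2, 3),
--         '7': neighbours(3, 1),
--         '8': neighbours(3, 2),
--         '9': neighbours(3, 3),
--         '*': neighbours(4, 1),
--         '0': neighbours(4, 2),
--         '#': neighbours(4, 3),
--     }
--
--     options = (''.join(sorted(focus_map[c])) for c in pin)
--     result = [''.join(z) for z in product(*options)]
--
--     return result
-- ===== SOURCE B (Python) =====
-- def pin_variations(pin):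
--     rows = ["123", "456", "789", "*0#"]
--     adjacent = {}
--     for r, row in enumerate(rows):
--         for c, key in enumerate(row):
--             opts = [key]
--             if r > 0:
--                 opts.append(rows[r - 1][c])
--             if r < len(rows) - 1:
--                 opts.append(rows[r + 1][c])
--             if c > 0:
--                 opts.append(row[c - 1])
--             if c < len(row) - 1:
--                 opts.append(row[c + 1])
--             adjacent[key] = ''.join(sorted(opts))
--
--     def walk(i, prefix):
--         if i == len(pin):
--             return [prefix]
--         return [v for ch in adjacent[pin[i]] for v in walk(i + 1, prefix + ch)]
--
--     return walk(0, '')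
-- ===== Notes on version B (the rewrite author's own statement) =====
-- stated objective: alternative
-- what changed: B derives each key's sorted neighbour string from the keypad layout in a single pass (instead of per-key set comprehensions with None borders) and enumerates the variations by an explicit recursive depth-first walk with a prefix accumulator instead of itertools.product; Pre_ excludes pins with off-keypad characters (KeyError) and pins containing '5' or '8', on which A raises TypeError when sorting a set that contains None.
-- outside the precondition, e.g. on pin_variations('5'): A raises TypeError, B returns ['2', '4', '5', '6', '8']; on pin_variations('8'): A raises TypeError, B returns ['0', '5', '7', '8', '9']
import Mathlib
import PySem

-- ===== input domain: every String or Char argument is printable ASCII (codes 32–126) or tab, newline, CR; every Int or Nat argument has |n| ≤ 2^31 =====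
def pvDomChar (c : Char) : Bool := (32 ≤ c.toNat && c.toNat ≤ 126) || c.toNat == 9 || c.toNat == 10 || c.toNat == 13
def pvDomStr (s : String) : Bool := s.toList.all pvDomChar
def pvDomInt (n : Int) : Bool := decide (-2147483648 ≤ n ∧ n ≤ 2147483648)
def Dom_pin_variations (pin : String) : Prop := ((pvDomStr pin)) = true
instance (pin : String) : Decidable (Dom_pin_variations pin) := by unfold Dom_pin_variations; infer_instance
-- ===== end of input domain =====

-- B derives each key's sorted neighbour string from the keypad layout in one pass and
-- enumerates the variations by an explicit recursive depth-first walk with a prefix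
-- accumulator instead of itertools.product (objective: alternative decomposition).

-- ===== PORT A =====
def pvKeyboard : List (List (Option Char)) :=
  [[none, none, none, none, none],
   [none, some '1', some '2', some '3', none],
   [none, some '4', some '5', some '6', none],
   [none, some '7', some '8', some '9', none],
   [none, some '*', some '0', some '#', none],
   [none, none, none, none, none]]

-- keyboard[r][c]; all call sites index in range, .join flattens Option (Option Char)
def pvKbGet (r c : Int) : Option Char :=
  match PySem.List.pyGet? pvKeyboard r with
  | some row => (PySem.List.pyGet? row c).join
  | none => none

-- the set comprehension, then `result ^ {None}`
def pvNeighbours (row col : Int) : PySem.Set (Option Char) :=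
  let result := PySem.Set.ofList
    ([((-1 : Int), (0 : Int)), (0, -1), (0, 0), (0, 1), (1, 0)].map
      (fun p => pvKbGet (row + p.1) (col + p.2)))
  PySem.Set.symmDiff result (PySem.Set.ofList [none])

def pvFocusMap : PySem.Dict Char (PySem.Set (Option Char)) :=
  PySem.Dict.ofList
    [('1', pvNeighbours 1 1), ('2', pvNeighbours 1 2), ('3', pvNeighbours 1 3),
     ('4', pvNeighbours 2 1), ('5', pvNeighbours 2 2), ('6', pvNeighbours 2 3),
     ('7', pvNeighbours 3 1), ('8', pvNeighbours 3 2), ('9', pvNeighbours 3 3),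
     ('*', pvNeighbours 4 1), ('0', pvNeighbours 4 2), ('#', pvNeighbours 4 3)]

-- ''.join(sorted(focus_map[c])): KeyError (char off the keypad) and the TypeError of
-- sorting a set containing None are both excluded by Pre_; under Pre_ the set is
-- None-free and filterMap id only strips the Option layer, so this is exact there.
def pvOptionA (c : Char) : String :=
  let s := (PySem.Dict.get? pvFocusMap c).getD []
  String.ofList (PySem.List.sorted (s.filterMap id) (fun x => x) false)

-- itertools.product(*options), leftmost slowest-varying, as the standard left fold
def pin_variations (pin : String) : List String :=
  let options := pin.toList.map pvOptionA
  (options.foldl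
      (fun acc s => acc.flatMap (fun p => s.toList.map (fun ch => p ++ [ch])))
      [[]]).map String.ofList

-- ===== PORT B =====
def pvRowsB : List String := ["123", "456", "789", "*0#"]

-- the adjacency table: for each key, itself and its grid neighbours, sorted.
-- All string/list indices at the `.getD` sites are in range by the enumerate bounds
-- and the loop guards, so the defaults are unreachable (exact).
def pvAdjacentB : PySem.Dict Char String :=
  (PySem.List.enumerate pvRowsB).foldl
    (fun d rp =>
      let r := rp.1
      let row := rp.2
      (PySem.List.enumerate row.toList).foldl
        (fun d cp =>
          let c := cp.1
          let key := cp.2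
          let opts : List Char := [key]
          let opts := opts ++ (if r > 0 then
            [((PySem.Str.pyGet? ((PySem.List.pyGet? pvRowsB (r - 1)).getD "") c).getD ' ')] else [])
          let opts := opts ++ (if r < (pvRowsB.length : Int) - 1 then
            [((PySem.Str.pyGet? ((PySem.List.pyGet? pvRowsB (r + 1)).getD "") c).getD ' ')] else [])
          let opts := opts ++ (if c > 0 then
            [((PySem.Str.pyGet? row (c - 1)).getD ' ')] else [])
          let opts := opts ++ (if c < (row.length : Int) - 1 then
            [((PySem.Str.pyGet? row (c + 1)).getD ' ')] else [])
          PySem.Dict.insert d key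
            (String.ofList (PySem.List.sorted opts (fun x => x) false))) d)
    (PySem.Dict.ofList [])

-- walk(i, prefix): recursion on the remaining pin suffix; the dict lookup's
-- KeyError (char off the keypad) is excluded by Pre_, so the "" default is unreachable
def pvWalkB (adj : PySem.Dict Char String) (pinL : List Char) (pre : String) : List String :=
  match pinL with
  | [] => [pre]
  | c :: rest =>
      ((PySem.Dict.get? adj c).getD "").toList.flatMap
        (fun ch => pvWalkB adj rest (pre.push ch))

def pin_variations_alt (pin : String) : List String :=
  pvWalkB pvAdjacentB pin.toList ""

-- ===== PRECONDITION & SPEC =====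
-- Pre_ excludes pins containing a character off the keypad (KeyError) and pins
-- containing '5' or '8', on which A's `result ^ {None}` ADDS None to the full
-- neighbour set and sorted() raises TypeError — A raises on every excluded input.
def Pre_pin_variations (pin : String) : Prop :=
  (pin.toList.all
      (fun c => ['1', '2', '3', '4', '6', '7', '9', '0', '*', '#'].contains c)) = true
instance (pin : String) : Decidable (Pre_pin_variations pin) := by
  unfold Pre_pin_variations; infer_instance

def pvWitness_pin_variations : String := "12"

def Spec_pin_variations (pin : String) (out : List String) : Prop := out = pin_variations_alt pin
instance (pin : String) (out : List String) : Decidable (Spec_pin_variations pin out) := by unfold Spec_pin_variations; infer_instance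

-- ===== CLAIM (what is proved, stated in full; the proofs are below) =====
def Claim_equal_pin_variations : Prop := ∀ (pin : String), Dom_pin_variations pin → Pre_pin_variations pin → Spec_pin_variations pin (pin_variations pin)

-- ===== LEMMAS AND PROOFS =====

-- on every keypad character admitted by Pre_, A's option string is B's table entry
set_option maxRecDepth 40000 in
theorem pvOptionA_eq_adj :
    ∀ c ∈ ['1', '2', '3', '4', '6', '7', '9', '0', '*', '#'],
      pvOptionA c = (PySem.Dict.get? pvAdjacentB c).getD "" := by
  intro c hc
  fin_cases hc <;> decide

-- the product fold on admitted pins, from any accumulator, is the depth-first walk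
theorem foldl_prod_eq_walkB (pinL : List Char)
    (h : ∀ c ∈ pinL, c ∈ ['1', '2', '3', '4', '6', '7', '9', '0', '*', '#']) :
    ∀ acc : List (List Char),
      ((pinL.map pvOptionA).foldl
          (fun acc s => acc.flatMap (fun p => s.toList.map (fun ch => p ++ [ch])))
          acc).map String.ofList
        = acc.flatMap (fun p => pvWalkB pvAdjacentB pinL (String.ofList p)) := by
  induction pinL with
  | nil =>
      intro acc
      simp [pvWalkB, ← List.map_eq_flatMap]
  | cons c rest ih =>
      intro acc
      simp only [List.map_cons, List.foldl_cons]
      rw [ih (fun x hx => h x (List.mem_cons_of_mem _ hx))]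
      simp only [pvWalkB, List.flatMap_assoc]
      refine List.flatMap_congr (fun p _ => ?_)
      rw [← pvOptionA_eq_adj c (h c List.mem_cons_self)]
      rw [List.flatMap_def, List.map_map]
      refine List.flatMap_congr (fun ch _ => ?_)
      show pvWalkB pvAdjacentB rest (String.ofList (p ++ [ch])) = _
      rw [String.ofList_append, ← String.singleton_eq_ofList, String.push_eq_append]

-- ===== VERDICT =====
theorem pin_variations_spec : Claim_equal_pin_variations := by
  intro pin _ hpre
  unfold Pre_pin_variations at hpre
  rw [List.all_eq_true] at hpre
  unfold Spec_pin_variations pin_variations pin_variations_alt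
  rw [foldl_prod_eq_walkB pin.toList (fun c hc => by simpa using hpre c hc)]
  simp [String.ofList_nil]
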